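-- pv_equiv track=rewrite | github.com/wx-qzhou/ADMH-ER | CaseStudy_file/Case_study/ID_triples.py | ID_change_numtriple
-- ===== SOURCE A (Python) =====
-- def ID_change_numtriple(ent_id, triple):
--     ID_triple = []
--     attr_dict = dict()
--     value_dict = dict()
--     ai, vi = 0, 0
--     for e, a, v in triple:
--         if a not in attr_dict:
--             attr_dict[a] = ai
--             ai = ai + 1
--         if v not in value_dict:
--             value_dict[v] = vi
--             vi = vi + 1
--         ID_triple.append((ent_id[e], attr_dict[a], value_dict[v]))
--     return ID_triple, attr_dict, value_dict
-- ===== SOURCE B (Python) =====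
-- def _first_occurrence(keys):
--     first = {}
--     for i, k in enumerate(keys):
--         if k not in first:
--             first[k] = i
--     return first
--
-- def _rank(first):
--     return {k: sum(1 for j in first.values() if j < i) for k, i in first.items()}
--
-- def ID_change_numtriple(ent_id, triple):
--     attr_dict = _rank(_first_occurrence([a for _, a, _ in triple]))
--     value_dict = _rank(_first_occurrence([v for _, _, v in triple]))
--     ID_triple = [(ent_id[e], attr_dict[a], value_dict[v]) for e, a, v in triple]
--     return ID_triple, attr_dict, value_dict
-- ===== Notes on version B (the rewrite author's own statement) =====
-- stated objective: alternative
-- what changed: A assigns IDs with an incremental counter inside one interleaved loop; B first records each key's first-occurrence position and then derives each ID by counting how many recorded positions are smaller (rank-by-counting), finally remapping the triples in a separate map pass.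
import Mathlib
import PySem

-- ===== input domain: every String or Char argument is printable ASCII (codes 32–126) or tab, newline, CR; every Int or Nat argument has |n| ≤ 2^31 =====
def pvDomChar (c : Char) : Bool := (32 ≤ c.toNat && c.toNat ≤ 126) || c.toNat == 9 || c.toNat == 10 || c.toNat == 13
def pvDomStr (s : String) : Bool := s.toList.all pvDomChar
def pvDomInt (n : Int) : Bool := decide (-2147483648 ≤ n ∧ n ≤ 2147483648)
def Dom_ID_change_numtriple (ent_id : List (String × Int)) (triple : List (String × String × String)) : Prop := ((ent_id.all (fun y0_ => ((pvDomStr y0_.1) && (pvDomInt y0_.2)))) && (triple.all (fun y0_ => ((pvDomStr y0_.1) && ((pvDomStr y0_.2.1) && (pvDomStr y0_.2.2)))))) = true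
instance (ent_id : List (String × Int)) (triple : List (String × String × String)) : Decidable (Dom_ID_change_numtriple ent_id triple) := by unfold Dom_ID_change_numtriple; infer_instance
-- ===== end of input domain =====

-- B replaces A's interleaved counter loop by a different algorithm: record each key's FIRST-OCCURRENCE
-- POSITION, then derive its ID by COUNTING how many recorded positions are smaller (rank-by-counting,
-- no incremental counter); an 'alternative' decomposition, not claimed faster.

-- ===== PORT A =====
-- ent_id[e]: Python raises KeyError when e is not a key; Pre_ excludes that, the port defaults to 0 there.
def ID_change_numtriple (ent_id : List (String × Int)) (triple : List (String × String × String)) :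
    (List (Int × Int × Int)) × (List (String × Int)) × (List (String × Int)) :=
  let ed := PySem.Dict.mk ent_id
  let st := triple.foldl
    (fun (st : List (Int × Int × Int) × PySem.Dict String Int × PySem.Dict String Int × Int × Int) t =>
      let ids := st.1; let ad := st.2.1; let vd := st.2.2.1; let ai := st.2.2.2.1; let vi := st.2.2.2.2
      let e := t.1; let a := t.2.1; let v := t.2.2
      let adai := if ad.contains a then (ad, ai) else (ad.insert a ai, ai + 1)
      let vdvi := if vd.contains v then (vd, vi) else (vd.insert v vi, vi + 1)
      (ids ++ [(ed.getD e 0, adai.1.getD a 0, vdvi.1.getD v 0)], adai.1, vdvi.1, adai.2, vdvi.2))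
    ([], .empty, .empty, 0, 0)
  (st.1, st.2.1.items, st.2.2.1.items)

-- ===== PORT B =====
-- helper _first_occurrence of Source B: for i, k in enumerate(keys): if k not in first: first[k] = i
def pvFirstOcc (keys : List String) : PySem.Dict String Int :=
  keys.zipIdx.foldl
    (fun d p => if d.contains p.1 then d else d.insert p.1 (p.2 : Int)) .empty

-- helper _rank of Source B: {k: sum(1 for j in first.values() if j < i) for k, i in first.items()}
-- (the 0/1-sum is ported as countP, cast to Int)
def pvRank (first : PySem.Dict String Int) : PySem.Dict String Int :=
  PySem.Dict.mk (first.items.map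
    (fun p => (p.1, ((first.values.countP (fun j => decide (j < p.2))) : Int))))

def ID_change_numtriple_alt (ent_id : List (String × Int)) (triple : List (String × String × String)) :
    (List (Int × Int × Int)) × (List (String × Int)) × (List (String × Int)) :=
  let ed := PySem.Dict.mk ent_id
  let attr_dict := pvRank (pvFirstOcc (triple.map (·.2.1)))
  let value_dict := pvRank (pvFirstOcc (triple.map (·.2.2)))
  let ID_triple := triple.map (fun t => (ed.getD t.1 0, attr_dict.getD t.2.1 0, value_dict.getD t.2.2 0))
  (ID_triple, attr_dict.items, value_dict.items)

-- ===== PRECONDITION & SPEC =====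
-- Pre_ excludes exactly the inputs where Python A raises KeyError: a triple whose entity is not a key of ent_id.
def Pre_ID_change_numtriple (ent_id : List (String × Int)) (triple : List (String × String × String)) : Prop :=
  (triple.all (fun t => (PySem.Dict.mk ent_id).contains t.1)) = true
instance (ent_id : List (String × Int)) (triple : List (String × String × String)) : Decidable (Pre_ID_change_numtriple ent_id triple) := by unfold Pre_ID_change_numtriple; infer_instance
def pvWitness_ID_change_numtriple : (List (String × Int)) × (List (String × String × String)) :=
  ([("x", 3), ("y", 7)], [("x", "a", "p"), ("y", "a", "q"), ("x", "b", "p")])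

def Spec_ID_change_numtriple (ent_id : List (String × Int)) (triple : List (String × String × String)) (out : (List (Int × Int × Int)) × (List (String × Int)) × (List (String × Int))) : Prop := out = ID_change_numtriple_alt ent_id triple
instance (ent_id : List (String × Int)) (triple : List (String × String × String)) (out : (List (Int × Int × Int)) × (List (String × Int)) × (List (String × Int))) : Decidable (Spec_ID_change_numtriple ent_id triple out) := by unfold Spec_ID_change_numtriple; infer_instance

-- ===== CLAIM (what is proved, stated in full; the proofs are below) =====
def Claim_equal_ID_change_numtriple : Prop := ∀ (ent_id : List (String × Int)) (triple : List (String × String × String)), Dom_ID_change_numtriple ent_id triple → Pre_ID_change_numtriple ent_id triple → Spec_ID_change_numtriple ent_id triple (ID_change_numtriple ent_id triple)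

-- ===== LEMMAS AND PROOFS =====

-- the common canonical value: first-seen distinct keys, paired with 0, 1, 2, ...
def pvCanon (ks : List String) : PySem.Dict String Int :=
  PySem.Dict.mk ((PySem.List.dedup ks).zipIdx.map (fun p => (p.1, (p.2 : Int))))

theorem pvMkContains (L : List (String × Int)) (k : String) :
    (PySem.Dict.mk L).contains k = true ↔ k ∈ L.map (·.1) := by
  rw [PySem.Dict.contains_iff_mem_keys]
  simp [PySem.Dict.keys_mk]

theorem pvZipKeys (l : List String) :
    (l.zipIdx.map (fun p : String × Nat => (p.1, (p.2 : Int)))).map (·.1) = l := by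
  rw [List.map_map]
  exact List.zipIdx_map_fst 0 l

theorem pvCanonContains (ks : List String) (k : String) :
    (pvCanon ks).contains k = true ↔ k ∈ PySem.List.dedup ks := by
  unfold pvCanon
  rw [pvMkContains, pvZipKeys]

theorem pvDedupAppend_mem (ks : List String) (k : String) (h : k ∈ PySem.List.dedup ks) :
    PySem.List.dedup (ks ++ [k]) = PySem.List.dedup ks := by
  have hm : k ∈ PySem.Set.ofList ks := by simpa [PySem.List.dedup_eq_ofList] using h
  rw [PySem.List.dedup_eq_ofList, PySem.List.dedup_eq_ofList,
      PySem.Set.ofList_append_singleton, PySem.Set.add_of_mem hm]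

theorem pvDedupAppend_not_mem (ks : List String) (k : String) (h : k ∉ PySem.List.dedup ks) :
    PySem.List.dedup (ks ++ [k]) = PySem.List.dedup ks ++ [k] := by
  have hm : k ∉ PySem.Set.ofList ks := by simpa [PySem.List.dedup_eq_ofList] using h
  rw [PySem.List.dedup_eq_ofList, PySem.List.dedup_eq_ofList,
      PySem.Set.ofList_append_singleton, PySem.Set.add_of_not_mem hm]

-- A-side counter fold (after pvStep_pair turns it into setdefault) computes pvCanon
theorem pvSetdefaultFold_eq_canon (ks : List String) :
    ks.foldl (fun d k => d.setdefault k (d.size : Int)) PySem.Dict.empty = pvCanon ks := by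
  induction ks using List.reverseRecOn with
  | nil => rfl
  | append_singleton ks k ih =>
      rw [List.foldl_append, List.foldl_cons, List.foldl_nil, ih]
      by_cases h : k ∈ PySem.List.dedup ks
      · have hc : (pvCanon ks).contains k = true := (pvCanonContains ks k).2 h
        rw [PySem.Dict.setdefault_of_contains _ _ hc]
        unfold pvCanon
        rw [pvDedupAppend_mem ks k h]
      · have hc : (pvCanon ks).contains k = false :=
          Bool.eq_false_iff.mpr (fun hct => h ((pvCanonContains ks k).1 hct))
        rw [PySem.Dict.setdefault_of_not_contains _ _ hc]
        apply PySem.Dict.ext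
        rw [PySem.Dict.items_insert_of_not_contains _ _ hc]
        unfold pvCanon
        rw [pvDedupAppend_not_mem ks k h, List.zipIdx_append, List.map_append]
        simp [PySem.Dict.size]

-- B-side helper _first_occurrence computes dedup paired with first-occurrence indices
theorem pvFirstOcc_eq (ks : List String) :
    pvFirstOcc ks
      = PySem.Dict.mk ((PySem.List.dedup ks).map (fun k => (k, (ks.idxOf k : Int)))) := by
  unfold pvFirstOcc
  induction ks using List.reverseRecOn with
  | nil => rfl
  | append_singleton ks k ih =>
      rw [List.zipIdx_append, List.foldl_append, ih]
      have hz : ([k].zipIdx (0 + ks.length)) = [(k, ks.length)] := by simp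
      rw [hz, List.foldl_cons, List.foldl_nil]
      have hkeys : (((PySem.List.dedup ks).map (fun k => (k, (ks.idxOf k : Int)))).map (·.1))
          = PySem.List.dedup ks := by rw [List.map_map]; exact List.map_id _
      by_cases h : k ∈ PySem.List.dedup ks
      · have hc : (PySem.Dict.mk ((PySem.List.dedup ks).map (fun k => (k, (ks.idxOf k : Int))))).contains k = true := by
          rw [pvMkContains, hkeys]; exact h
        simp only [hc, if_true]
        rw [pvDedupAppend_mem ks k h]
        congr 1
        apply List.map_congr_left
        intro j hj
        have : j ∈ ks := by simpa [PySem.List.mem_dedup] using hj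
        rw [List.idxOf_append_of_mem this]
      · have hc : (PySem.Dict.mk ((PySem.List.dedup ks).map (fun k => (k, (ks.idxOf k : Int))))).contains k = false :=
          Bool.eq_false_iff.mpr (fun hct => h (by rw [pvMkContains, hkeys] at hct; exact hct))
        simp only [hc, Bool.false_eq_true, if_false]
        apply PySem.Dict.ext
        rw [PySem.Dict.items_insert_of_not_contains _ _ hc]
        rw [pvDedupAppend_not_mem ks k h, List.map_append]
        have hk : k ∉ ks := fun hm => h (by simpa [PySem.List.mem_dedup] using hm)
        congr 1
        · apply List.map_congr_left
          intro j hj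
          have : j ∈ ks := by simpa [PySem.List.mem_dedup] using hj
          rw [List.idxOf_append_of_mem this]
        · simp [List.idxOf_append, hk]

-- the first-occurrence indices, read along dedup order, strictly increase
theorem pvFirstIdx_increasing (ks : List String) :
    ((PySem.List.dedup ks).map (fun k => (ks.idxOf k : Int))).Pairwise (· < ·) := by
  induction ks using List.reverseRecOn with
  | nil => simp [PySem.List.dedup]
  | append_singleton ks k ih =>
      by_cases h : k ∈ PySem.List.dedup ks
      · rw [pvDedupAppend_mem ks k h]
        have : (PySem.List.dedup ks).map (fun j => (((ks ++ [k]).idxOf j : Nat) : Int))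
            = (PySem.List.dedup ks).map (fun j => (ks.idxOf j : Int)) := by
          apply List.map_congr_left
          intro j hj
          rw [List.idxOf_append_of_mem (by simpa [PySem.List.mem_dedup] using hj)]
        rw [this]; exact ih
      · have hk : k ∉ ks := fun hm => h (by simpa [PySem.List.mem_dedup] using hm)
        rw [pvDedupAppend_not_mem ks k h, List.map_append]
        apply List.pairwise_append.2
        refine ⟨?_, by simp, ?_⟩
        · have : (PySem.List.dedup ks).map (fun j => (((ks ++ [k]).idxOf j : Nat) : Int))
              = (PySem.List.dedup ks).map (fun j => (ks.idxOf j : Int)) := by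
            apply List.map_congr_left
            intro j hj
            rw [List.idxOf_append_of_mem (by simpa [PySem.List.mem_dedup] using hj)]
          rw [this]; exact ih
        · intro x hx y hy
          simp only [List.map_cons, List.map_nil, List.mem_singleton] at hy
          rcases List.mem_map.1 hx with ⟨j, hj, rfl⟩
          have hjm : j ∈ ks := by simpa [PySem.List.mem_dedup] using hj
          have h1 : (ks ++ [k]).idxOf j = ks.idxOf j := List.idxOf_append_of_mem hjm
          have h2 : (ks ++ [k]).idxOf k = ks.length := by
            simp [List.idxOf_append, hk]
          have h3 : ks.idxOf j < ks.length := List.idxOf_lt_length_of_mem hjm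
          rw [hy, h1, h2]
          exact_mod_cast h3

-- in a strictly increasing list, the number of elements below the i-th element is i
theorem pvCountP_lt_of_pairwise (L : List Int) (hL : L.Pairwise (· < ·)) :
    ∀ i (h : i < L.length), L.countP (fun j => decide (j < L[i])) = i := by
  induction L with
  | nil => intro i h; simp at h
  | cons a L' ih =>
      intro i h
      rcases List.pairwise_cons.1 hL with ⟨ha, hL'⟩
      cases i with
      | zero =>
          simp only [List.getElem_cons_zero, List.countP_cons]
          rw [List.countP_eq_zero.2 (by intro j hj; simpa using not_lt.2 (le_of_lt (ha j hj)))]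
          simp
      | succ i' =>
          have h' : i' < L'.length := by simpa using h
          have h3 : a < L'[i'] := ha _ (List.getElem_mem h')
          have hc : L'.countP (fun j => decide (j < L'[i'])) = i' := ih hL' i' h'
          simp [h3]
          exact hc

-- B's rank of the first-occurrence table is pvCanon
theorem pvRank_firstOcc_eq_canon (ks : List String) :
    pvRank (pvFirstOcc ks) = pvCanon ks := by
  rw [pvFirstOcc_eq]
  unfold pvRank pvCanon
  apply PySem.Dict.ext
  simp only [PySem.Dict.values, List.map_map]
  apply List.ext_getElem
  · simp
  · intro i h1 h2
    simp only [List.getElem_map, List.getElem_zipIdx, Function.comp_def]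
    have hlen : i < (PySem.List.dedup ks).length := by simpa using h1
    have hcnt := pvCountP_lt_of_pairwise _ (pvFirstIdx_increasing ks) i (by simpa using hlen)
    rw [List.getElem_map] at hcnt
    refine Prod.ext rfl ?_
    simp only []
    rw [hcnt]
    simp

-- ===== the A-side loop machinery =====

theorem pvFoldStep_getD {α : Type} (l : List α) (f : α → String) (d : PySem.Dict String Int)
    (k : String) (h : d.contains k = true) :
    (l.foldl (fun d x => d.setdefault (f x) (d.size : Int)) d).getD k 0 = d.getD k 0 := by
  induction l generalizing d with
  | nil => rfl
  | cons x xs ih =>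
      rw [List.foldl_cons]
      by_cases hk : f x = k
      · rw [hk, PySem.Dict.setdefault_of_contains _ _ h]
        exact ih d h
      · have hc : (d.setdefault (f x) (d.size : Int)).contains k = true := by
          simp [PySem.Dict.contains_setdefault, h]
        rw [ih _ hc, PySem.Dict.getD_eq_get?_getD,
          PySem.Dict.get?_setdefault_of_ne _ _ (fun hkk => hk hkk.symm),
          ← PySem.Dict.getD_eq_get?_getD]

theorem pvStep_pair (d : PySem.Dict String Int) (k : String) :
    (if d.contains k then (d, (d.size : Int)) else (d.insert k (d.size : Int), (d.size : Int) + 1))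
      = (d.setdefault k (d.size : Int), ((d.setdefault k (d.size : Int)).size : Int)) := by
  by_cases h : d.contains k = true
  · rw [PySem.Dict.setdefault_of_contains _ _ h]; simp [h]
  · have h' : d.contains k = false := by simpa using h
    rw [PySem.Dict.setdefault_of_not_contains _ _ h']
    simp [h', PySem.Dict.size_insert]

theorem pvGetD_fst (ts : List (String × String × String)) (d : PySem.Dict String Int)
    (k : String) (h : d.contains k = true) :
    (ts.foldl (fun d t => d.setdefault t.2.1 (d.size : Int)) d).getD k 0 = d.getD k 0 :=
  pvFoldStep_getD ts (fun t => t.2.1) d k h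

theorem pvGetD_snd (ts : List (String × String × String)) (d : PySem.Dict String Int)
    (k : String) (h : d.contains k = true) :
    (ts.foldl (fun d t => d.setdefault t.2.2 (d.size : Int)) d).getD k 0 = d.getD k 0 :=
  pvFoldStep_getD ts (fun t => t.2.2) d k h

theorem pvMainLoop (ed : PySem.Dict String Int) (triple : List (String × String × String))
    (ids : List (Int × Int × Int)) (ad vd : PySem.Dict String Int) :
    triple.foldl
      (fun (st : List (Int × Int × Int) × PySem.Dict String Int × PySem.Dict String Int × Int × Int) t =>
        let ids := st.1; let ad := st.2.1; let vd := st.2.2.1; let ai := st.2.2.2.1; let vi := st.2.2.2.2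
        let e := t.1; let a := t.2.1; let v := t.2.2
        let adai := if ad.contains a then (ad, ai) else (ad.insert a ai, ai + 1)
        let vdvi := if vd.contains v then (vd, vi) else (vd.insert v vi, vi + 1)
        (ids ++ [(ed.getD e 0, adai.1.getD a 0, vdvi.1.getD v 0)], adai.1, vdvi.1, adai.2, vdvi.2))
      (ids, ad, vd, (ad.size : Int), (vd.size : Int)) =
    (ids ++ triple.map (fun t =>
        (ed.getD t.1 0,
         (triple.foldl (fun d t => d.setdefault t.2.1 (d.size : Int)) ad).getD t.2.1 0,
         (triple.foldl (fun d t => d.setdefault t.2.2 (d.size : Int)) vd).getD t.2.2 0)),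
     triple.foldl (fun d t => d.setdefault t.2.1 (d.size : Int)) ad,
     triple.foldl (fun d t => d.setdefault t.2.2 (d.size : Int)) vd,
     ((triple.foldl (fun d t => d.setdefault t.2.1 (d.size : Int)) ad).size : Int),
     ((triple.foldl (fun d t => d.setdefault t.2.2 (d.size : Int)) vd).size : Int)) := by
  induction triple generalizing ids ad vd with
  | nil => simp
  | cons t ts ih =>
      simp only [List.foldl_cons, List.map_cons, pvStep_pair]
      rw [ih]
      rw [pvGetD_fst ts (ad.setdefault t.2.1 (ad.size : Int)) t.2.1
            (by simp [PySem.Dict.contains_setdefault]),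
          pvGetD_snd ts (vd.setdefault t.2.2 (vd.size : Int)) t.2.2
            (by simp [PySem.Dict.contains_setdefault])]
      simp

-- ===== VERDICT =====
theorem ID_change_numtriple_spec : Claim_equal_ID_change_numtriple := by
  intro ent_id triple _ _
  unfold Spec_ID_change_numtriple ID_change_numtriple ID_change_numtriple_alt
  rw [pvRank_firstOcc_eq_canon, pvRank_firstOcc_eq_canon,
      ← pvSetdefaultFold_eq_canon, ← pvSetdefaultFold_eq_canon]
  simp only [List.foldl_map]
  rw [show ((0:Int), (0:Int)) = (((PySem.Dict.empty : PySem.Dict String Int).size : Int), ((PySem.Dict.empty : PySem.Dict String Int).size : Int)) from rfl]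
  rw [pvMainLoop]
  simp
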